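-- pv_equiv track=rewrite | github.com/Njihia413/yubikey-serial-demo | backend/app.py | parse_yubikey_info
-- ===== SOURCE A (Python) =====
-- def parse_yubikey_info(info_output):
--     """Parse ykman info output into structured data"""
--     info = {
--         'version': 'Unknown',
--         'form_factor': 'Unknown',
--         'device_type': 'YubiKey'
--     }
--
--     lines = info_output.split('\n')
--     for line in lines:
--         line = line.strip()
--         if line.startswith('Firmware version:'):
--             info['version'] = line.split(':', 1)[1].strip()
--         elif line.startswith('Form factor:'):
--             info['form_factor'] = line.split(':', 1)[1].strip()
--         elif line.startswith('Device type:'):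
--             info['device_type'] = line.split(':', 1)[1].strip()
--
--     return info
-- ===== SOURCE B (Python) =====
-- def parse_yubikey_info(info_output):
--     """Parse ykman info output into structured data"""
--     lines = [ln.strip() for ln in info_output.split('\n')]
--
--     def last_value(prefix, default):
--         for ln in reversed(lines):
--             if ln.startswith(prefix):
--                 return ln.split(':', 1)[1].strip()
--         return default
--
--     return {
--         'version': last_value('Firmware version:', 'Unknown'),
--         'form_factor': last_value('Form factor:', 'Unknown'),
--         'device_type': last_value('Device type:', 'YubiKey'),
--     }
-- ===== Notes on version B (the rewrite author's own statement) =====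
-- stated objective: alternative
-- what changed: Inverts the loop nesting: instead of A's single forward pass dispatching each line to a field with later matches overwriting earlier ones, B searches the lines backwards once per field and returns at the first (= last) matching line, with the default if none matches.
import Mathlib
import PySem

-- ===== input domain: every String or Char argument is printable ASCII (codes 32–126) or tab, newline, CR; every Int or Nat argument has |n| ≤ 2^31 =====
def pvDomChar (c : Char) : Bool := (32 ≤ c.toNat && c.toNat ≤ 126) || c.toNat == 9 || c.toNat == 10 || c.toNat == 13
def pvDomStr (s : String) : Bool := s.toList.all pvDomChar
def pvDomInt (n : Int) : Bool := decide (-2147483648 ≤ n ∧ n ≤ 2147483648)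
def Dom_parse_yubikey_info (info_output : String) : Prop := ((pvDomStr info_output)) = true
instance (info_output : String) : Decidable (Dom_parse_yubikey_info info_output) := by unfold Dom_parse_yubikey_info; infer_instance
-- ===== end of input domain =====

-- B inverts A's loop nesting: one backward search per field for the last matching line
-- instead of one forward pass dispatching lines to fields; alternative, not claimed faster.

-- ===== PORT A =====
def parse_yubikey_info (info_output : String) : List (String × String) :=
  let info : PySem.Dict String String :=
    (((PySem.Dict.empty).insert "version" "Unknown").insert "form_factor" "Unknown").insert
      "device_type" "YubiKey"
  let lines := (PySem.Str.split? info_output "\n").getD []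
  let info := lines.foldl (fun d line0 =>
    let line := PySem.Str.strip line0
    if PySem.Str.startswith line "Firmware version:" then
      d.insert "version"
        (PySem.Str.strip ((PySem.List.pyGet? ((PySem.Str.splitMax? line ":" 1).getD []) 1).getD ""))
    else if PySem.Str.startswith line "Form factor:" then
      d.insert "form_factor"
        (PySem.Str.strip ((PySem.List.pyGet? ((PySem.Str.splitMax? line ":" 1).getD []) 1).getD ""))
    else if PySem.Str.startswith line "Device type:" then
      d.insert "device_type"
        (PySem.Str.strip ((PySem.List.pyGet? ((PySem.Str.splitMax? line ":" 1).getD []) 1).getD ""))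
    else d) info
  info.items

-- ===== PORT B =====
-- line.split(':', 1)[1].strip() of Source B's last_value
def pvVal (s : String) : String :=
  PySem.Str.strip ((PySem.List.pyGet? ((PySem.Str.splitMax? s ":" 1).getD []) 1).getD "")

-- Source B's last_value: walk the given (already reversed) line list, return at the first match
def pvLastValue (pre dflt : String) : List String → String
  | [] => dflt
  | ln :: rest =>
    if PySem.Str.startswith ln pre then pvVal ln else pvLastValue pre dflt rest

def parse_yubikey_info_alt (info_output : String) : List (String × String) :=
  let lines := ((PySem.Str.split? info_output "\n").getD []).map PySem.Str.strip
  [("version", pvLastValue "Firmware version:" "Unknown" lines.reverse),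
   ("form_factor", pvLastValue "Form factor:" "Unknown" lines.reverse),
   ("device_type", pvLastValue "Device type:" "YubiKey" lines.reverse)]

-- ===== PRECONDITION & SPEC =====
def Spec_parse_yubikey_info (info_output : String) (out : List (String × String)) : Prop := out = parse_yubikey_info_alt info_output
instance (info_output : String) (out : List (String × String)) : Decidable (Spec_parse_yubikey_info info_output out) := by unfold Spec_parse_yubikey_info; infer_instance

-- ===== CLAIM (what is proved, stated in full; the proofs are below) =====
def Claim_equal_parse_yubikey_info : Prop := ∀ (info_output : String), Dom_parse_yubikey_info info_output → Spec_parse_yubikey_info info_output (parse_yubikey_info info_output)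

-- ===== LEMMAS AND PROOFS =====

-- abbreviations for the three prefix tests (proof-local)
def pvP1 (s : String) : Bool := PySem.Str.startswith s "Firmware version:"
def pvP2 (s : String) : Bool := PySem.Str.startswith s "Form factor:"
def pvP3 (s : String) : Bool := PySem.Str.startswith s "Device type:"

-- the elif-chain of A, acting on the (version, form_factor, device_type) triple
def pvStep (t : String × String × String) (s : String) : String × String × String :=
  if pvP1 s then (pvVal s, t.2.1, t.2.2)
  else if pvP2 s then (t.1, pvVal s, t.2.2)
  else if pvP3 s then (t.1, t.2.1, pvVal s)
  else t

-- the three label prefixes are mutually exclusive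
lemma pv_excl12 (s : String) : pvP1 s = true → pvP2 s = false := by
  intro h1
  by_contra h
  have h2 : pvP2 s = true := by revert h; cases pvP2 s <;> simp
  unfold pvP1 at h1; unfold pvP2 at h2
  rw [PySem.Str.startswith, PySem.Chars.startswith, List.isPrefixOf_iff_prefix] at h1 h2
  have := List.prefix_of_prefix_length_le h2 h1 (by decide)
  exact absurd this (by decide)

lemma pv_excl13 (s : String) : pvP1 s = true → pvP3 s = false := by
  intro h1
  by_contra h
  have h2 : pvP3 s = true := by revert h; cases pvP3 s <;> simp
  unfold pvP1 at h1; unfold pvP3 at h2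
  rw [PySem.Str.startswith, PySem.Chars.startswith, List.isPrefixOf_iff_prefix] at h1 h2
  have := List.prefix_of_prefix_length_le h2 h1 (by decide)
  exact absurd this (by decide)

lemma pv_excl23 (s : String) : pvP2 s = true → pvP3 s = false := by
  intro h1
  by_contra h
  have h2 : pvP3 s = true := by revert h; cases pvP3 s <;> simp
  unfold pvP2 at h1; unfold pvP3 at h2
  rw [PySem.Str.startswith, PySem.Chars.startswith, List.isPrefixOf_iff_prefix] at h1 h2
  have := List.prefix_of_prefix_length_le h1 h2 (by decide)
  exact absurd this (by decide)

-- A's dict loop, on a dict with exactly the three keys in order, is pvStep on the value triple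
lemma pv_dict_foldl (ls : List String) : ∀ (t : String × String × String),
    (ls.foldl (fun d line0 =>
      let line := PySem.Str.strip line0
      if PySem.Str.startswith line "Firmware version:" then
        d.insert "version" (pvVal line)
      else if PySem.Str.startswith line "Form factor:" then
        d.insert "form_factor" (pvVal line)
      else if PySem.Str.startswith line "Device type:" then
        d.insert "device_type" (pvVal line)
      else d)
      (PySem.Dict.mk [("version", t.1), ("form_factor", t.2.1), ("device_type", t.2.2)])).items
    = (let t' := ls.foldl (fun t s => pvStep t (PySem.Str.strip s)) t
       [("version", t'.1), ("form_factor", t'.2.1), ("device_type", t'.2.2)]) := by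
  induction ls with
  | nil => intro t; rfl
  | cons x xs ih =>
    intro t
    simp only [List.foldl_cons]
    have hstep :
        (let line := PySem.Str.strip x
         if PySem.Str.startswith line "Firmware version:" then
           (PySem.Dict.mk [("version", t.1), ("form_factor", t.2.1), ("device_type", t.2.2)]).insert "version" (pvVal line)
         else if PySem.Str.startswith line "Form factor:" then
           (PySem.Dict.mk [("version", t.1), ("form_factor", t.2.1), ("device_type", t.2.2)]).insert "form_factor" (pvVal line)
         else if PySem.Str.startswith line "Device type:" then
           (PySem.Dict.mk [("version", t.1), ("form_factor", t.2.1), ("device_type", t.2.2)]).insert "device_type" (pvVal line)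
         else (PySem.Dict.mk [("version", t.1), ("form_factor", t.2.1), ("device_type", t.2.2)]))
        = (let t' := pvStep t (PySem.Str.strip x)
           PySem.Dict.mk [("version", t'.1), ("form_factor", t'.2.1), ("device_type", t'.2.2)]) := by
      simp only [pvStep, pvP1, pvP2, pvP3]
      split_ifs <;> apply PySem.Dict.ext <;>
        simp [PySem.Dict.items_insert, PySem.Dict.contains]
    rw [hstep]
    exact ih _

-- pvStep updates each component only when its own predicate fires
lemma pv_step_fst (t : String × String × String) (s : String) :
    (pvStep t s).1 = if pvP1 s then pvVal s else t.1 := by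
  unfold pvStep
  cases h1 : pvP1 s
  · simp only [Bool.false_eq_true, if_false]
    split_ifs <;> rfl
  · simp

lemma pv_step_snd (t : String × String × String) (s : String) :
    (pvStep t s).2.1 = if pvP2 s then pvVal s else t.2.1 := by
  unfold pvStep
  cases h1 : pvP1 s
  · simp only [Bool.false_eq_true, if_false]
    split_ifs <;> rfl
  · simp [pv_excl12 s h1]

lemma pv_step_thd (t : String × String × String) (s : String) :
    (pvStep t s).2.2 = if pvP3 s then pvVal s else t.2.2 := by
  unfold pvStep
  cases h1 : pvP1 s
  · cases h2 : pvP2 s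
    · simp only [Bool.false_eq_true, if_false]
      split_ifs <;> rfl
    · simp [pv_excl23 s h2]
  · simp [pv_excl13 s h1]

-- a forward fold keeping the last match equals Source B's backward search
lemma pv_fold_fst (ls : List String) (t : String × String × String) :
    (ls.foldl pvStep t).1 = pvLastValue "Firmware version:" t.1 ls.reverse := by
  induction ls using List.reverseRecOn generalizing t with
  | nil => rfl
  | append_singleton ms x ih =>
    rw [List.foldl_append, List.reverse_append]
    simp only [List.foldl_cons, List.foldl_nil, List.reverse_singleton, List.singleton_append]
    rw [pv_step_fst]
    unfold pvLastValue pvP1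
    split_ifs with h
    · rfl
    · exact ih t

lemma pv_fold_snd (ls : List String) (t : String × String × String) :
    (ls.foldl pvStep t).2.1 = pvLastValue "Form factor:" t.2.1 ls.reverse := by
  induction ls using List.reverseRecOn generalizing t with
  | nil => rfl
  | append_singleton ms x ih =>
    rw [List.foldl_append, List.reverse_append]
    simp only [List.foldl_cons, List.foldl_nil, List.reverse_singleton, List.singleton_append]
    rw [pv_step_snd]
    unfold pvLastValue pvP2
    split_ifs with h
    · rfl
    · exact ih t

lemma pv_fold_thd (ls : List String) (t : String × String × String) :
    (ls.foldl pvStep t).2.2 = pvLastValue "Device type:" t.2.2 ls.reverse := by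
  induction ls using List.reverseRecOn generalizing t with
  | nil => rfl
  | append_singleton ms x ih =>
    rw [List.foldl_append, List.reverse_append]
    simp only [List.foldl_cons, List.foldl_nil, List.reverse_singleton, List.singleton_append]
    rw [pv_step_thd]
    unfold pvLastValue pvP3
    split_ifs with h
    · rfl
    · exact ih t

-- ===== VERDICT (by name: the statement is the Claim_ definition above) =====
theorem parse_yubikey_info_spec : Claim_equal_parse_yubikey_info := by
  intro info_output _
  unfold Spec_parse_yubikey_info parse_yubikey_info parse_yubikey_info_alt
  set ls := (PySem.Str.split? info_output "\n").getD [] with hls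
  have hinit : (((PySem.Dict.empty).insert "version" "Unknown").insert "form_factor" "Unknown").insert
      "device_type" "YubiKey"
      = PySem.Dict.mk [("version", "Unknown"), ("form_factor", "Unknown"), ("device_type", "YubiKey")] := by
    decide
  simp only [hinit]
  have h := pv_dict_foldl ls ("Unknown", "Unknown", "YubiKey")
  simp only [pvVal] at h
  rw [h]
  have hmapfold : ls.foldl (fun t s => pvStep t (PySem.Str.strip s)) ("Unknown", "Unknown", "YubiKey")
      = (ls.map PySem.Str.strip).foldl pvStep ("Unknown", "Unknown", "YubiKey") := by
    rw [List.foldl_map]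
  simp only [hmapfold, pv_fold_fst, pv_fold_snd, pv_fold_thd]
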